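-- pv_equiv track=rewrite | github.com/buildingSMART/IFC4.3.x-development | code/express.py | ifc_name
-- ===== SOURCE A (Python) =====
-- express_basic_types = {"REAL", "NUMBER", "BINARY", "BOOLEAN", "INTEGER", "STRING", "LOGICAL"}
--
-- def ifc_name(name):
--     if name.startswith("ENUMERATION"): return name
--     if name.startswith("SELECT"): return name
--     if name.startswith("Ifc"): return name
--     for ebt in express_basic_types:
--         if ebt in name: return name
--     name = "".join([" ", c][c.isalnum()] for c in name)
--     s = "".join((s[0:1].upper() + s[1:].lower()) for s in name.split(" "))
--     if not s.lower().startswith("ifc"):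
--         s = "Ifc" + s
--     return s
-- ===== SOURCE B (Python) =====
-- express_basic_types = {"REAL", "NUMBER", "BINARY", "BOOLEAN", "INTEGER", "STRING", "LOGICAL"}
--
-- def ifc_name(name):
--     if name.startswith("ENUMERATION"): return name
--     if name.startswith("SELECT"): return name
--     if name.startswith("Ifc"): return name
--     if any(ebt in name for ebt in express_basic_types): return name
--     out = []
--     at_word_start = True
--     for c in name:
--         if c.isalnum():
--             out.append(c.upper() if at_word_start else c.lower())
--             at_word_start = False
--         else:
--             at_word_start = True
--     s = "".join(out)
--     if not s.lower().startswith("ifc"):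
--         s = "Ifc" + s
--     return s
-- ===== Notes on version B (the rewrite author's own statement) =====
-- stated objective: alternative
-- what changed: Replaces A's three-pass pipeline (replace non-alnum by spaces, split on spaces, capitalize each piece and join) by a single pass over the characters that tracks a word-start flag and emits each alnum char upper- or lowercased directly.
import Mathlib
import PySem

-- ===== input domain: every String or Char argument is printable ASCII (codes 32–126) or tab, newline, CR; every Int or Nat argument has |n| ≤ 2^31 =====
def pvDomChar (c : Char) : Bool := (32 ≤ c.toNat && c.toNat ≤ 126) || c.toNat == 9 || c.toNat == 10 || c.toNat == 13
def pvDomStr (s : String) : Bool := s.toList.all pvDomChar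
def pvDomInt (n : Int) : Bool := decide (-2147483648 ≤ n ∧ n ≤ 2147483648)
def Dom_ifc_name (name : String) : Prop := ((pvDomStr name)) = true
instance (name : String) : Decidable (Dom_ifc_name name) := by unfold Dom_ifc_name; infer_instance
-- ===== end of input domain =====

-- B replaces A's replace/split/capitalize/join pipeline by a single pass tracking a word-start flag.

-- ===== PORT A =====
def express_basic_types : PySem.Set String :=
  PySem.Set.ofList ["REAL", "NUMBER", "BINARY", "BOOLEAN", "INTEGER", "STRING", "LOGICAL"]

-- s[0:1].upper() + s[1:].lower()
def pvCap (w : List Char) : List Char :=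
  PySem.Chars.upper (PySem.Chars.slice w (some 0) (some 1)) ++
    PySem.Chars.lower (PySem.Chars.slice w (some 1) none)

def ifc_name (name : String) : String :=
  if PySem.Str.startswith name "ENUMERATION" then name
  else if PySem.Str.startswith name "SELECT" then name
  else if PySem.Str.startswith name "Ifc" then name
  else if express_basic_types.any (fun ebt => PySem.Str.isIn ebt name) then name
  else
    -- name = "".join([" ", c][c.isalnum()] for c in name)
    let name1 : List Char := name.toList.map (fun c => if PySem.Chars.isalnum c then c else ' ')
    -- s = "".join((s[0:1].upper() + s[1:].lower()) for s in name.split(" "))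
    let s : List Char := PySem.Chars.join [] ((PySem.Chars.splitOn name1 [' ']).map pvCap)
    let s : List Char :=
      if !(PySem.Chars.startswith (PySem.Chars.lower s) "ifc".toList) then "Ifc".toList ++ s else s
    String.mk s

-- ===== PORT B =====
-- the single-pass loop of Source B: Bool = at_word_start
def pvCamel : List Char → Bool → List Char
  | [], _ => []
  | c :: rest, ws =>
    if PySem.Chars.isalnum c then
      (if ws then PySem.Chars.upperChar c else PySem.Chars.lowerChar c) :: pvCamel rest false
    else pvCamel rest true

def ifc_name_alt (name : String) : String :=
  if PySem.Str.startswith name "ENUMERATION" then name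
  else if PySem.Str.startswith name "SELECT" then name
  else if PySem.Str.startswith name "Ifc" then name
  else if express_basic_types.any (fun ebt => PySem.Str.isIn ebt name) then name
  else
    let s : List Char := pvCamel name.toList true
    let s : List Char :=
      if !(PySem.Chars.startswith (PySem.Chars.lower s) "ifc".toList) then "Ifc".toList ++ s else s
    String.mk s

-- ===== PRECONDITION & SPEC =====
def Spec_ifc_name (name : String) (out : String) : Prop := out = ifc_name_alt name
instance (name : String) (out : String) : Decidable (Spec_ifc_name name out) := by unfold Spec_ifc_name; infer_instance

-- ===== CLAIM (what is proved, stated in full; the proofs are below) =====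
def Claim_equal_ifc_name : Prop := ∀ (name : String), Dom_ifc_name name → Spec_ifc_name name (ifc_name name)

-- ===== LEMMAS AND PROOFS =====

-- simple recursive characterisation of splitOn with separator [' ']
def pvSplit : List Char → List (List Char)
  | [] => [[]]
  | c :: rest =>
    if c = ' ' then [] :: pvSplit rest
    else (pvSplit rest).modifyHead (c :: ·)

theorem pvSplit_ne_nil (l : List Char) : pvSplit l ≠ [] := by
  induction l with
  | nil => simp [pvSplit]
  | cons c rest ih =>
    simp only [pvSplit]
    split_ifs
    · simp
    · cases h : pvSplit rest with
      | nil => exact absurd h ih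
      | cons a b => simp [List.modifyHead]

theorem splitOn_go_space (l : List Char) :
    ∀ fuel cur acc, l.length ≤ fuel →
      PySem.Chars.splitOn.go [' '] fuel l cur acc =
        acc.reverse ++ (pvSplit l).modifyHead (cur.reverse ++ ·) := by
  induction l with
  | nil =>
    intro fuel cur acc _
    cases fuel <;> simp [PySem.Chars.splitOn.go, pvSplit, List.modifyHead]
  | cons c rest ih =>
    intro fuel cur acc hf
    cases fuel with
    | zero => simp at hf
    | succ f =>
      by_cases hc : c = ' '
      · subst hc
        have hpre : [' '].isPrefixOf (' ' :: rest) = true := by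
          simp [List.isPrefixOf]
        simp only [PySem.Chars.splitOn.go, hpre, if_pos, List.length_cons, List.length_nil,
          List.drop_succ_cons, List.drop_zero]
        rw [ih f [] (cur.reverse :: acc) (by simpa using Nat.lt_succ_iff.mp (by simpa using hf))]
        simp [pvSplit]
        cases h : pvSplit rest <;> simp [List.modifyHead]
      · have hpre : [' '].isPrefixOf (c :: rest) = false := by
          simp only [List.isPrefixOf, Bool.and_eq_false_iff, beq_eq_false_iff_ne, ne_eq]
          exact Or.inl fun h => hc h.symm
        simp only [PySem.Chars.splitOn.go, hpre, Bool.false_eq_true, if_false]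
        rw [ih f (c :: cur) acc (by simpa using Nat.lt_succ_iff.mp (by simpa using hf))]
        simp only [pvSplit, hc, if_false, List.reverse_cons]
        congr 1
        cases h : pvSplit rest with
        | nil => exact absurd h (pvSplit_ne_nil rest)
        | cons h' t' => simp [List.modifyHead, List.append_assoc]

theorem splitOn_space (l : List Char) : PySem.Chars.splitOn l [' '] = pvSplit l := by
  unfold PySem.Chars.splitOn
  rw [splitOn_go_space l (l.length + 1) [] [] (by omega)]
  cases h : pvSplit l <;> simp [List.modifyHead]

theorem pvCap_nil : pvCap [] = [] := by
  simp [pvCap, PySem.Chars.slice, PySem.List.slice, PySem.Chars.upper, PySem.Chars.lower]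

theorem pvCap_cons (c : Char) (t : List Char) :
    pvCap (c :: t) = PySem.Chars.upperChar c :: PySem.Chars.lower t := by
  simp [pvCap, PySem.Chars.slice, PySem.List.slice, PySem.List.clampIdx,
    PySem.Chars.upper, PySem.Chars.lower]

-- the alnum-or-space substitution
def pvF (c : Char) : Char := if PySem.Chars.isalnum c then c else ' '

theorem alnum_ne_space (c : Char) (h : PySem.Chars.isalnum c = true) : c ≠ ' ' := by
  intro hc; subst hc
  simp [PySem.Chars.isalnum, PySem.Chars.isalpha, PySem.Chars.isdigit,
    PySem.Chars.isupper, PySem.Chars.islower] at h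

-- the heart: A's pipeline equals B's single pass (both the word-start and in-word states)
theorem pipeline_eq_camel (cs : List Char) :
    ((pvSplit (cs.map pvF)).map pvCap).flatten = pvCamel cs true ∧
    (∀ h t, pvSplit (cs.map pvF) = h :: t →
      PySem.Chars.lower h ++ (t.map pvCap).flatten = pvCamel cs false) := by
  induction cs with
  | nil =>
    refine ⟨by simp [pvSplit, pvCap_nil, pvCamel], ?_⟩
    intro h t heq
    simp [pvSplit] at heq
    obtain ⟨rfl, rfl⟩ := heq
    simp [pvCamel, PySem.Chars.lower]
  | cons c rest ih =>
    by_cases ha : PySem.Chars.isalnum c = true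
    · have hf : pvF c = c := by simp [pvF, ha]
      have hcs : c ≠ ' ' := alnum_ne_space c ha
      obtain ⟨h', t', hsp⟩ : ∃ h' t', pvSplit (rest.map pvF) = h' :: t' := by
        cases hx : pvSplit (rest.map pvF) with
        | nil => exact absurd hx (pvSplit_ne_nil _)
        | cons a b => exact ⟨a, b, rfl⟩
      have hsplit : pvSplit ((c :: rest).map pvF) = (c :: h') :: t' := by
        simp [pvSplit, hf, hcs, hsp, List.modifyHead]
      constructor
      · rw [hsplit]
        simp only [List.map_cons, List.flatten_cons, pvCap_cons]
        rw [pvCamel]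
        simp only [ha, if_pos, List.cons_append]
        exact congrArg (PySem.Chars.upperChar c :: ·) (ih.2 h' t' hsp)
      · intro h t heq
        rw [hsplit] at heq
        injection heq with e1 e2
        subst e1; subst e2
        simp only [PySem.Chars.lower, List.map_cons, List.cons_append]
        rw [pvCamel]
        simp only [ha, if_pos]
        exact congrArg (PySem.Chars.lowerChar c :: ·) (ih.2 h' t' hsp)
    · have hf : pvF c = ' ' := by simp [pvF, ha]
      have hsplit : pvSplit ((c :: rest).map pvF) = [] :: pvSplit (rest.map pvF) := by
        simp [pvSplit, hf]
      constructor
      · rw [hsplit]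
        simp only [List.map_cons, List.flatten_cons, pvCap_nil, List.nil_append]
        rw [pvCamel]
        simp only [ha, Bool.false_eq_true, if_false]
        exact ih.1
      · intro h t heq
        rw [hsplit] at heq
        injection heq with h1 h2
        subst h1; subst h2
        simp only [PySem.Chars.lower, List.map_nil, List.nil_append]
        rw [pvCamel]
        simp only [ha, Bool.false_eq_true, if_false]
        exact ih.1

theorem join_nil_eq_flatten (l : List (List Char)) : PySem.Chars.join [] l = l.flatten := by
  induction l with
  | nil => rfl
  | cons a t ih =>
    cases t with
    | nil => simp [PySem.Chars.join, List.intercalate, List.intersperse]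
    | cons b u =>
      simp only [PySem.Chars.join, List.intercalate, List.intersperse] at ih ⊢
      simp [ih]

theorem pipeline_main (cs : List Char) :
    PySem.Chars.join []
      ((PySem.Chars.splitOn (cs.map (fun c => if PySem.Chars.isalnum c then c else ' ')) [' ']).map pvCap)
      = pvCamel cs true := by
  rw [show (cs.map fun c => if PySem.Chars.isalnum c then c else ' ') = cs.map pvF from rfl,
    splitOn_space, join_nil_eq_flatten]
  exact (pipeline_eq_camel cs).1

-- ===== VERDICT (by name: the statement is the Claim_ definition above) =====
theorem ifc_name_spec : Claim_equal_ifc_name := by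
  intro name _
  unfold Spec_ifc_name ifc_name ifc_name_alt
  split_ifs with h1 h2 h3 h4 <;> try rfl
  have key := pipeline_main name.toList
  simp only [key]
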